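-- pv_equiv track=rewrite | github.com/myxu95/PRISM_PMF | forcefield/openff.py | _count_atoms_in_itp
-- ===== SOURCE A (Python) =====
-- def _count_atoms_in_itp(itp_content):
--     """Count atoms in ITP file"""
--     lines = itp_content.split("\n")
--     current_section = None
--     atom_count = 0
--
--     for line in lines:
--         stripped = line.strip()
--
--         # Detect section changes
--         if stripped.startswith("[") and stripped.endswith("]"):
--             current_section = stripped[1:-1].strip()
--             continue
--
--         # Only count in atoms section
--         if current_section == "atoms" and stripped and not stripped.startswith(";"):
--             parts = stripped.split()
--             if len(parts) >= 8:
--                 try: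
--                     atom_index = int(parts[0])
--                     atom_count = max(atom_count, atom_index)
--                 except (ValueError, IndexError):
--                     pass
--
--     return atom_count
-- ===== SOURCE B (Python) =====
-- def _count_atoms_in_itp(itp_content):
--     """Count atoms in ITP file"""
--     # Phase 1: partition the file into named [section] blocks.
--     blocks = []
--     for line in itp_content.split("\n"):
--         stripped = line.strip()
--         if stripped.startswith("[") and stripped.endswith("]"):
--             blocks.append((stripped[1:-1].strip(), []))
--         elif blocks:
--             blocks[-1][1].append(stripped)
--     # Phase 2: maximum atom index over data lines of every "atoms" block.
--     best = 0
--     for name, body in blocks: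
--         if name != "atoms":
--             continue
--         for stripped in body:
--             if stripped and not stripped.startswith(";"):
--                 parts = stripped.split()
--                 if len(parts) >= 8:
--                     try:
--                         best = max(best, int(parts[0]))
--                     except ValueError:
--                         pass
--     return best
-- ===== Notes on version B (the rewrite author's own statement) =====
-- stated objective: alternative
-- what changed: B first partitions the file into named section blocks (appending body lines to the last opened block), then takes the maximum atom index over the bodies of all 'atoms' blocks, instead of A's single pass that threads a current-section variable through every line.
import Mathlib
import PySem

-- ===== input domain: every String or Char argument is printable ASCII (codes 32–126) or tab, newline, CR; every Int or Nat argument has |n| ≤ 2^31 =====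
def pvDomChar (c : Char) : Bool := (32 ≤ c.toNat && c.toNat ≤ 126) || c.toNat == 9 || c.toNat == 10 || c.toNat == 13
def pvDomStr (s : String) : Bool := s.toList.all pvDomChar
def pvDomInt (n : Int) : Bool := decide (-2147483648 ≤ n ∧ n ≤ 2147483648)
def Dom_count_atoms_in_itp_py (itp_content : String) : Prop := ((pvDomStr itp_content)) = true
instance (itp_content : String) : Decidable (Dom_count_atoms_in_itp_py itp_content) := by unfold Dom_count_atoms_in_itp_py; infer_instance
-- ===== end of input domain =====

-- B partitions the file into named section blocks first and then maximises over the 'atoms' blocks,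
-- instead of A's single pass threading a current-section variable; alternative decomposition, same cost.

-- ===== PORT A =====
-- one loop iteration of A: state = (current_section, atom_count)
def pvStepA (st : Option String × Int) (line : String) : Option String × Int :=
  let stripped := PySem.Str.strip line
  if PySem.Str.startswith stripped "[" && PySem.Str.endswith stripped "]" then
    (some (PySem.Str.strip (PySem.Str.slice stripped (some 1) (some (-1)))), st.2)
  else if st.1 == some "atoms" && stripped != "" && !PySem.Str.startswith stripped ";" then
    let parts := PySem.Str.split₀ stripped
    if 8 ≤ parts.length then
      match PySem.List.pyGet? parts 0 with
      | some p0 =>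
        match PySem.Int.ofStr? p0 with
        | some n => (st.1, max st.2 n)
        | none => st          -- ValueError caught
      | none => st            -- IndexError caught (unreachable: parts.length ≥ 8)
    else st
  else st

-- itp_content.split("\n"): PySem.Str.split? is `some` whenever the separator ≠ "", so getD is exact
def count_atoms_in_itp_py (itp_content : String) : Int :=
  (((PySem.Str.split? itp_content "\n").getD []).foldl pvStepA (none, 0)).2

-- ===== PORT B =====
-- blocks[-1][1].append(s) (a no-op on an empty block list, as Source B's `elif blocks:` guards)
def pvAppendLast : List (String × List String) → String → List (String × List String)
  | [], _ => []
  | [b], s => [(b.1, b.2 ++ [s])]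
  | b :: bs, s => b :: pvAppendLast bs s

-- phase 1 step: open a new block on a [header] line, else extend the last block's body
def pvBlockStep (blocks : List (String × List String)) (line : String) : List (String × List String) :=
  let stripped := PySem.Str.strip line
  if PySem.Str.startswith stripped "[" && PySem.Str.endswith stripped "]" then
    blocks ++ [(PySem.Str.strip (PySem.Str.slice stripped (some 1) (some (-1))), [])]
  else pvAppendLast blocks stripped

-- phase 2: fold a body line into the running maximum
def pvBestLine (best : Int) (stripped : String) : Int :=
  if stripped != "" && !PySem.Str.startswith stripped ";" then
    let parts := PySem.Str.split₀ stripped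
    if 8 ≤ parts.length then
      match PySem.List.pyGet? parts 0 with
      | some p0 =>
        match PySem.Int.ofStr? p0 with
        | some n => max best n
        | none => best        -- ValueError caught
      | none => best          -- IndexError caught (unreachable: parts.length ≥ 8)
    else best
  else best

def pvBestBlock (best : Int) (blk : String × List String) : Int :=
  if blk.1 == "atoms" then blk.2.foldl pvBestLine best else best

def count_atoms_in_itp_py_alt (itp_content : String) : Int :=
  ((((PySem.Str.split? itp_content "\n").getD []).foldl pvBlockStep []).foldl pvBestBlock 0)

-- ===== PRECONDITION & SPEC =====
def Spec_count_atoms_in_itp_py (itp_content : String) (out : Int) : Prop := out = count_atoms_in_itp_py_alt itp_content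
instance (itp_content : String) (out : Int) : Decidable (Spec_count_atoms_in_itp_py itp_content out) := by unfold Spec_count_atoms_in_itp_py; infer_instance

-- ===== CLAIM (what is proved, stated in full; the proofs are below) =====
def Claim_equal_count_atoms_in_itp_py : Prop := ∀ (itp_content : String), Dom_count_atoms_in_itp_py itp_content → Spec_count_atoms_in_itp_py itp_content (count_atoms_in_itp_py itp_content)

-- ===== LEMMAS AND PROOFS =====

-- appending a line to the last block, concretely
theorem pvAppendLast_concat (bs : List (String × List String)) (nm : String)
    (body : List String) (s : String) :
    pvAppendLast (bs ++ [(nm, body)]) s = bs ++ [(nm, body ++ [s])] := by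
  induction bs with
  | nil => rfl
  | cons b bs ih =>
    cases bs with
    | nil => simp [pvAppendLast]
    | cons c cs => simpa [pvAppendLast] using ih

-- an empty block contributes nothing to phase 2
theorem pvFold_concat_empty (bs : List (String × List String)) (nm : String) :
    (bs ++ [(nm, [])]).foldl pvBestBlock 0 = bs.foldl pvBestBlock 0 := by
  rw [List.foldl_append]
  simp only [List.foldl_cons, List.foldl_nil]
  unfold pvBestBlock
  dsimp only
  cases nm == "atoms" <;> simp

-- extending the last block's body by one line = folding that line in afterwards (for an atoms block)
theorem pvFold_concat_snoc (bs : List (String × List String)) (nm : String)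
    (body : List String) (s : String) :
    (bs ++ [(nm, body ++ [s])]).foldl pvBestBlock 0 =
      (if nm == "atoms" then pvBestLine ((bs ++ [(nm, body)]).foldl pvBestBlock 0) s
       else (bs ++ [(nm, body)]).foldl pvBestBlock 0) := by
  rw [List.foldl_append, List.foldl_append]
  simp only [List.foldl_cons, List.foldl_nil]
  unfold pvBestBlock
  dsimp only
  cases nm == "atoms"
  · simp
  · simp [List.foldl_append]

-- A's step on a non-header line, expressed through B's line folder
set_option maxHeartbeats 1600000 in
theorem pvStepA_nonheader (cur : Option String) (acc : Int) (l : String)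
    (h : (PySem.Str.startswith (PySem.Str.strip l) "[" &&
          PySem.Str.endswith (PySem.Str.strip l) "]") = false) :
    pvStepA (cur, acc) l =
      (cur, if cur == some "atoms" then pvBestLine acc (PySem.Str.strip l) else acc) := by
  unfold pvStepA pvBestLine
  dsimp only
  rw [if_neg (by rw [h]; exact Bool.false_ne_true)]
  cases hc : cur == some "atoms" with
  | false =>
    simp only [Bool.false_and, Bool.false_eq_true, if_false]
  | true =>
    simp only [Bool.true_and, if_true]
    split
    · split
      · split
        · split <;> rfl
        · rfl
      · rfl
    · rfl

-- A's step on a header line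
theorem pvStepA_header (cur : Option String) (acc : Int) (l : String)
    (h : (PySem.Str.startswith (PySem.Str.strip l) "[" &&
          PySem.Str.endswith (PySem.Str.strip l) "]") = true) :
    pvStepA (cur, acc) l =
      (some (PySem.Str.strip (PySem.Str.slice (PySem.Str.strip l) (some 1) (some (-1)))), acc) := by
  unfold pvStepA
  dsimp only
  rw [if_pos h]

-- main invariant: running phase 1 from any block list and then phase 2 equals running A's loop
-- from the corresponding state (last block's name, phase-2 value of the blocks built so far)
theorem pvMain (ls : List String) (bs : List (String × List String)) :
    ((ls.foldl pvBlockStep bs).foldl pvBestBlock 0) =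
      (ls.foldl pvStepA ((bs.getLast?).map Prod.fst, bs.foldl pvBestBlock 0)).2 := by
  induction ls generalizing bs with
  | nil => rfl
  | cons l ls ih =>
    simp only [List.foldl_cons]
    by_cases h : (PySem.Str.startswith (PySem.Str.strip l) "[" &&
        PySem.Str.endswith (PySem.Str.strip l) "]") = true
    · have hb : pvBlockStep bs l =
          bs ++ [(PySem.Str.strip (PySem.Str.slice (PySem.Str.strip l) (some 1) (some (-1))), [])] := by
        unfold pvBlockStep; dsimp only; rw [if_pos h]
      rw [hb, pvStepA_header _ _ _ h, ih]
      have h1 : (((bs ++ [(PySem.Str.strip (PySem.Str.slice (PySem.Str.strip l) (some 1) (some (-1))), ([] : List String))]).getLast?).map Prod.fst) = some (PySem.Str.strip (PySem.Str.slice (PySem.Str.strip l) (some 1) (some (-1)))) := by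
        simp
      rw [h1, pvFold_concat_empty]
    · have h' : (PySem.Str.startswith (PySem.Str.strip l) "[" &&
          PySem.Str.endswith (PySem.Str.strip l) "]") = false := by
        simpa using h
      have hb : pvBlockStep bs l = pvAppendLast bs (PySem.Str.strip l) := by
        unfold pvBlockStep; dsimp only; rw [if_neg (by rw [h']; exact Bool.false_ne_true)]
      rw [hb, pvStepA_nonheader _ _ _ h']
      rcases List.eq_nil_or_concat bs with hnil | ⟨bs₀, ⟨nm, body⟩, hcat⟩
      · subst hnil
        simpa [pvAppendLast] using ih []
      · subst hcat
        simp only [List.concat_eq_append]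
        rw [pvAppendLast_concat, ih (bs₀ ++ [(nm, body ++ [PySem.Str.strip l])])]
        have h1 : (((bs₀ ++ [(nm, body ++ [PySem.Str.strip l])]).getLast?).map Prod.fst) = some nm := by simp
        have h2 : (((bs₀ ++ [(nm, body)]).getLast?).map Prod.fst) = some nm := by simp
        rw [h1, h2, pvFold_concat_snoc]
        have h3 : (some nm == some "atoms") = (nm == "atoms") := by
          cases hb : nm == "atoms" <;> simp_all
        rw [h3]

-- ===== VERDICT (by name: the statement is the Claim_ definition above) =====
theorem count_atoms_in_itp_py_spec : Claim_equal_count_atoms_in_itp_py := by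
  intro itp _
  unfold Spec_count_atoms_in_itp_py count_atoms_in_itp_py count_atoms_in_itp_py_alt
  simpa using (pvMain ((PySem.Str.split? itp "\n").getD []) []).symm
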